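-- pv_equiv track=rewrite | github.com/ts322/2D-Reactor | 2D_Reactor/VAE/data_prep.py | parse_checkmesh_output
-- ===== SOURCE A (Python) =====
-- SEVERE_PATTERNS = ["Zero or negative face area", "Zero or negative cell volume", "incorrectly oriented"]
--
-- def parse_checkmesh_output(text):
--     mesh_size = None
--     for line in text.splitlines():
--         if line.strip().startswith("cells:"):
--             try: mesh_size = int(line.split()[-1])
--             except: pass
--     severe_hits = [p for p in SEVERE_PATTERNS if p in text]
--     failed = ("Failed" in text) or bool(severe_hits)
--     return not failed, mesh_size, severe_hits
-- ===== SOURCE B (Python) =====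
-- SEVERE_PATTERNS = ["Zero or negative face area", "Zero or negative cell volume", "incorrectly oriented"]
--
-- def parse_checkmesh_output(text):
--     mesh_size = None
--     failed = False
--     seen = [False] * len(SEVERE_PATTERNS)
--     for line in text.splitlines():
--         if line.strip().startswith("cells:"):
--             try: mesh_size = int(line.split()[-1])
--             except: pass
--         if "Failed" in line:
--             failed = True
--         seen = [s or (p in line) for s, p in zip(seen, SEVERE_PATTERNS)]
--     severe_hits = [p for p, s in zip(SEVERE_PATTERNS, seen) if s]
--     ok = not failed and not severe_hits
--     return ok, mesh_size, severe_hits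
-- ===== Notes on version B (the rewrite author's own statement) =====
-- stated objective: alternative
-- what changed: B makes a single pass over the split lines that maintains the mesh size, a failure flag and one seen-flag per severe pattern, replacing A's separate whole-text substring scans (the failure marker plus one scan per pattern) done outside the line loop; severe_hits is rebuilt in pattern-list order from the flags.
import Mathlib
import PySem

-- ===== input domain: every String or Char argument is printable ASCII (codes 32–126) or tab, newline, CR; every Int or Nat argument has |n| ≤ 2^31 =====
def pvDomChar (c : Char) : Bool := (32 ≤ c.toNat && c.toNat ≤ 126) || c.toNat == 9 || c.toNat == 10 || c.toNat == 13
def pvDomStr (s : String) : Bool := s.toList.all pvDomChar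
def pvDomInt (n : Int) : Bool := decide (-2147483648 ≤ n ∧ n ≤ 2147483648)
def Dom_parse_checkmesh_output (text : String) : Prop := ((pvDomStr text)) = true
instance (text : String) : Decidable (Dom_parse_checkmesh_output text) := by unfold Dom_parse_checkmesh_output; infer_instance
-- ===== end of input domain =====

-- B fuses A's three whole-text substring scans and the 'Failed' scan into the single pass
-- over text.splitlines() that A already makes for the mesh size (objective: alternative).

-- ===== PORT A =====
def SEVERE_PATTERNS : List String :=
  ["Zero or negative face area", "Zero or negative cell volume", "incorrectly oriented"]

-- the loop body 'if line.strip().startswith("cells:"): try: mesh_size = int(line.split()[-1]) except: pass'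
-- (bare except: both IndexError from [-1] and ValueError from int() leave mesh_size unchanged);
-- B's Python repeats these two source lines verbatim inside its fused loop, so both ports use this helper
def cellsStep (ms : Option Int) (line : String) : Option Int :=
  if PySem.Str.startswith (PySem.Str.strip line) "cells:" then
    match PySem.List.pyGet? (PySem.Str.split₀ line) (-1) with
    | some tok =>
      match PySem.Int.ofStr? tok with
      | some v => some v
      | none => ms
    | none => ms
  else ms

def parse_checkmesh_output (text : String) : Bool × Option Int × List String :=
  let mesh_size := (PySem.Str.splitlines text).foldl cellsStep none
  let severe_hits := SEVERE_PATTERNS.filter (fun p => PySem.Str.isIn p text)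
  let failed := PySem.Str.isIn "Failed" text || !severe_hits.isEmpty
  (!failed, mesh_size, severe_hits)

-- ===== PORT B =====
-- one fused loop body: state = (mesh_size, failed flag, per-pattern seen flags)
def altStep (st : Option Int × Bool × List Bool) (line : String) : Option Int × Bool × List Bool :=
  (cellsStep st.1 line,
   st.2.1 || PySem.Str.isIn "Failed" line,
   List.zipWith (fun s p => s || PySem.Str.isIn p line) st.2.2 SEVERE_PATTERNS)

def parse_checkmesh_output_alt (text : String) : Bool × Option Int × List String :=
  let st := (PySem.Str.splitlines text).foldl altStep
              (none, false, SEVERE_PATTERNS.map (fun _ => false))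
  let severe_hits := ((SEVERE_PATTERNS.zip st.2.2).filter (fun ps => ps.2)).map (fun ps => ps.1)
  (!st.2.1 && severe_hits.isEmpty, st.1, severe_hits)

-- ===== PRECONDITION & SPEC =====
def Spec_parse_checkmesh_output (text : String) (out : Bool × Option Int × List String) : Prop := out = parse_checkmesh_output_alt text
instance (text : String) (out : Bool × Option Int × List String) : Decidable (Spec_parse_checkmesh_output text out) := by unfold Spec_parse_checkmesh_output; infer_instance

-- ===== CLAIM (what is proved, stated in full; the proofs are below) =====
def Claim_equal_parse_checkmesh_output : Prop := ∀ (text : String), Dom_parse_checkmesh_output text → Spec_parse_checkmesh_output text (parse_checkmesh_output text)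

-- ===== LEMMAS AND PROOFS =====

-- a reference structural recursion computing Python's str.splitlines, proved equal to
-- PySem's accumulator version below; the infix/prefix lemmas are stated against it
def mySplit (isB : Char → Bool) : List Char → List (List Char)
  | [] => []
  | '\x0d' :: '\n' :: rest => [] :: mySplit isB rest
  | c :: rest =>
    if isB c then [] :: mySplit isB rest
    else
      match mySplit isB rest with
      | [] => [[c]]
      | l :: ls => (c :: l) :: ls

def consFirstL (pre : List Char) : List (List Char) → List (List Char)
  | [] => if pre.isEmpty then [] else [pre]
  | l :: ls => (pre ++ l) :: ls

theorem mySplit_cons (isB : Char → Bool) (c : Char) (rest : List Char)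
    (h : ∀ rest', c = '\x0d' → rest = '\n' :: rest' → False) :
    mySplit isB (c :: rest) =
      if isB c then [] :: mySplit isB rest
      else match mySplit isB rest with
        | [] => [[c]]
        | l :: ls => (c :: l) :: ls := by
  rw [mySplit.eq_def]
  split
  · rename_i heq; exact absurd heq (by simp)
  · rename_i rest' heq
    injection heq with h1 h2
    exact (h rest' h1 h2).elim
  · rename_i c' rest' hne heq
    injection heq with h1 h2
    subst h1; subst h2; rfl

theorem go_pair (isB : Char → Bool) (rest cur : List Char) (acc : List (List Char)) :
    PySem.Chars.splitlines.go isB ('\x0d' :: '\n' :: rest) cur acc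
      = PySem.Chars.splitlines.go isB rest [] (cur.reverse :: acc) := rfl

theorem go_cons (isB : Char → Bool) (c : Char) (rest cur : List Char) (acc : List (List Char))
    (h : ∀ rest', c = '\x0d' → rest = '\n' :: rest' → False) :
    PySem.Chars.splitlines.go isB (c :: rest) cur acc
      = if isB c then PySem.Chars.splitlines.go isB rest [] (cur.reverse :: acc)
        else PySem.Chars.splitlines.go isB rest (c :: cur) acc := by
  rw [PySem.Chars.splitlines.go.eq_def]
  split
  · rename_i heq; exact absurd heq (by simp)
  · rename_i rest' heq
    injection heq with h1 h2
    exact (h rest' h1 h2).elim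
  · rename_i c' rest' hne heq
    injection heq with h1 h2
    subst h1; subst h2; rfl

theorem go_eq_mySplit (isB : Char → Bool) :
    ∀ (s cur : List Char) (acc : List (List Char)),
      PySem.Chars.splitlines.go isB s cur acc = acc.reverse ++ consFirstL cur.reverse (mySplit isB s) := by
  intro s
  induction s using mySplit.induct (isB := isB) with
  | case1 =>
      intro cur acc
      cases cur <;> simp [PySem.Chars.splitlines.go, mySplit, consFirstL]
  | case2 rest ih =>
      intro cur acc
      rw [go_pair, ih]
      show _ = acc.reverse ++ consFirstL cur.reverse ([] :: mySplit isB rest)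
      cases h : mySplit isB rest <;> simp [consFirstL]
  | case3 c rest hne hb ih =>
      intro cur acc
      rw [go_cons isB c rest cur acc hne, if_pos hb, ih, mySplit_cons isB c rest hne, if_pos hb]
      cases h : mySplit isB rest <;> simp [consFirstL]
  | case4 c rest hne hb hrec ih =>
      intro cur acc
      rw [go_cons isB c rest cur acc hne, if_neg hb, ih, mySplit_cons isB c rest hne, if_neg hb]
      rw [hrec]
      simp [consFirstL]
  | case5 c rest hne hb l ls hrec ih =>
      intro cur acc
      rw [go_cons isB c rest cur acc hne, if_neg hb, ih, mySplit_cons isB c rest hne, if_neg hb]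
      rw [hrec]
      simp [consFirstL]

theorem mySplit_infix (isB : Char → Bool) (s : List Char) :
    (∀ l ∈ mySplit isB s, l <:+: s) ∧ (mySplit isB s).headD [] <+: s := by
  induction s using mySplit.induct (isB := isB) with
  | case1 => simp [mySplit]
  | case2 rest ih =>
      constructor
      · intro l hl
        rcases List.mem_cons.mp hl with h | h
        · subst h; exact List.nil_infix
        · exact List.infix_cons (List.infix_cons (ih.1 l h))
      · simp [mySplit]
  | case3 c rest hne hb ih =>
      rw [mySplit_cons isB c rest hne, if_pos hb]
      constructor
      · intro l hl
        rcases List.mem_cons.mp hl with h | h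
        · subst h; exact List.nil_infix
        · exact List.infix_cons (ih.1 l h)
      · simp
  | case4 c rest hne hb hrec ih =>
      rw [mySplit_cons isB c rest hne, if_neg hb, hrec]
      refine ⟨?_, ?_⟩
      · intro l hl
        simp at hl; subst hl
        exact List.infix_cons_iff.mpr (Or.inl (by simp))
      · simp
  | case5 c rest hne hb l ls hrec ih =>
      rw [mySplit_cons isB c rest hne, if_neg hb, hrec]
      have hhead : l <+: rest := by simpa [hrec] using ih.2
      refine ⟨?_, ?_⟩
      · intro l' hl'
        rcases List.mem_cons.mp hl' with h | h
        · subst h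
          exact (List.cons_prefix_cons.mpr ⟨rfl, hhead⟩).isInfix
        · exact List.infix_cons (ih.1 l' (by simp [hrec, h]))
      · show (c :: l) <+: c :: rest
        exact List.cons_prefix_cons.mpr ⟨rfl, hhead⟩

theorem prefix_headD (isB : Char → Bool) (hr : isB '\x0d' = true) (s : List Char) :
    ∀ (p : List Char), (∀ c ∈ p, isB c = false) → p <+: s → p <+: (mySplit isB s).headD [] := by
  induction s using mySplit.induct (isB := isB) with
  | case1 =>
      intro p _ hp
      simpa [mySplit] using hp
  | case2 rest ih =>
      intro p hnb hp
      cases p with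
      | nil => simp
      | cons a p' =>
          obtain ⟨rfl, -⟩ := List.cons_prefix_cons.mp hp
          have := hnb '\x0d' (by simp)
          rw [this] at hr; simp at hr
  | case3 c rest hne hb ih =>
      intro p hnb hp
      cases p with
      | nil => simp
      | cons a p' =>
          obtain ⟨rfl, -⟩ := List.cons_prefix_cons.mp hp
          have := hnb _ (List.mem_cons_self ..)
          rw [this] at hb; simp at hb
  | case4 c rest hne hb hrec ih =>
      intro p hnb hp
      rw [mySplit_cons isB c rest hne, if_neg hb, hrec]
      cases p with
      | nil => simp
      | cons a p' =>
          obtain ⟨rfl, hp'⟩ := List.cons_prefix_cons.mp hp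
          have h2 := ih p' (fun c hc => hnb c (by simp [hc])) hp'
          rw [hrec] at h2; simp at h2
          simp [h2]
  | case5 c rest hne hb l ls hrec ih =>
      intro p hnb hp
      rw [mySplit_cons isB c rest hne, if_neg hb, hrec]
      cases p with
      | nil => simp
      | cons a p' =>
          obtain ⟨rfl, hp'⟩ := List.cons_prefix_cons.mp hp
          have h2 := ih p' (fun c hc => hnb c (by simp [hc])) hp'
          rw [hrec] at h2; simp at h2
          exact List.cons_prefix_cons.mpr ⟨rfl, h2⟩

theorem infix_iff_line (isB : Char → Bool) (hr : isB '\x0d' = true) (hn : isB '\n' = true)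
    (p : List Char) (hne : p ≠ [])
    (hp : ∀ c ∈ p, isB c = false) :
    ∀ (s : List Char), (p <:+: s ↔ ∃ l ∈ mySplit isB s, p <:+: l) := by
  intro s
  constructor
  · induction s using mySplit.induct (isB := isB) with
    | case1 =>
        intro h
        exact absurd (List.infix_nil.mp h) hne
    | case2 rest ih =>
        intro h
        have h1 : p <:+: rest := by
          rcases List.infix_cons_iff.mp h with h | h
          · cases p with
            | nil => exact absurd rfl hne
            | cons a p' =>
                obtain ⟨rfl, -⟩ := List.cons_prefix_cons.mp h
                have := hp '\x0d' (by simp)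
                rw [this] at hr; simp at hr
          · rcases List.infix_cons_iff.mp h with h' | h'
            · cases p with
              | nil => exact absurd rfl hne
              | cons a p' =>
                  obtain ⟨rfl, -⟩ := List.cons_prefix_cons.mp h'
                  have := hp '\n' (by simp)
                  rw [this] at hn; simp at hn
            · exact h'
        obtain ⟨l, hl, hpl⟩ := ih h1
        exact ⟨l, by simp [mySplit, hl], hpl⟩
    | case3 c rest hne' hb ih =>
        intro h
        have h1 : p <:+: rest := by
          rcases List.infix_cons_iff.mp h with h | h
          · cases p with
            | nil => exact absurd rfl hne
            | cons a p' =>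
                obtain ⟨rfl, -⟩ := List.cons_prefix_cons.mp h
                have := hp _ (List.mem_cons_self ..)
                rw [this] at hb; simp at hb
          · exact h
        obtain ⟨l, hl, hpl⟩ := ih h1
        rw [mySplit_cons isB c rest hne', if_pos hb]
        exact ⟨l, by simp [hl], hpl⟩
    | case4 c rest hne' hb hrec ih =>
        intro h
        rw [mySplit_cons isB c rest hne', if_neg hb, hrec]
        rcases List.infix_cons_iff.mp h with h | h
        · -- p is a prefix of c :: rest
          refine ⟨[c], by simp, ?_⟩
          cases p with
          | nil => exact absurd rfl hne
          | cons a p' =>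
              obtain ⟨rfl, hp'⟩ := List.cons_prefix_cons.mp h
              have h2 := prefix_headD isB hr rest p' (fun c hc => hp c (by simp [hc])) hp'
              rw [hrec] at h2; simp at h2
              subst h2
              exact List.infix_refl _
        · obtain ⟨l, hl, -⟩ := ih h
          rw [hrec] at hl; simp at hl
    | case5 c rest hne' hb l ls hrec ih =>
        intro h
        rw [mySplit_cons isB c rest hne', if_neg hb, hrec]
        rcases List.infix_cons_iff.mp h with h | h
        · refine ⟨c :: l, by simp, ?_⟩
          cases p with
          | nil => exact absurd rfl hne
          | cons a p' =>
              obtain ⟨rfl, hp'⟩ := List.cons_prefix_cons.mp h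
              have h2 := prefix_headD isB hr rest p' (fun c hc => hp c (by simp [hc])) hp'
              rw [hrec] at h2; simp at h2
              exact (List.cons_prefix_cons.mpr ⟨rfl, h2⟩).isInfix
        · obtain ⟨l', hl', hpl'⟩ := ih h
          rw [hrec] at hl'
          rcases List.mem_cons.mp hl' with h' | h'
          · subst h'
            exact ⟨c :: l', by simp, List.infix_cons hpl'⟩
          · exact ⟨l', by simp [h'], hpl'⟩
  · rintro ⟨l, hl, hpl⟩
    exact hpl.trans ((mySplit_infix isB s).1 l hl)

-- the break predicate Python's str.splitlines uses (as baked into PySem.Chars.splitlines)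
def pvIsB (c : Char) : Bool :=
  decide (c.toNat = 10) || decide (c.toNat = 13) || decide (c.toNat = 11) || decide (c.toNat = 12) ||
  decide (c.toNat = 28) || decide (c.toNat = 29) || decide (c.toNat = 30) || decide (c.toNat = 133) ||
  decide (c.toNat = 8232) || decide (c.toNat = 8233)

theorem chars_splitlines_eq (s : List Char) :
    PySem.Chars.splitlines s = mySplit pvIsB s := by
  show PySem.Chars.splitlines.go pvIsB s [] [] = _
  rw [go_eq_mySplit]
  cases h : mySplit pvIsB s <;> simp [consFirstL, h]

-- 'sub in text' equals 'any(sub in line for line in text.splitlines())' for a pattern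
-- that is nonempty and contains no line-break character
theorem isIn_eq_any_line (p text : String) (hne : p.toList ≠ [])
    (hp : ∀ c ∈ p.toList, pvIsB c = false) :
    PySem.Str.isIn p text = (PySem.Str.splitlines text).any (fun l => PySem.Str.isIn p l) := by
  have key := infix_iff_line pvIsB (by decide) (by decide) p.toList hne hp text.toList
  rw [← chars_splitlines_eq, ← PySem.Str.splitlines_map_toList] at key
  simp only [PySem.Str.isIn_eq]
  rw [Bool.eq_iff_iff, PySem.Chars.isIn_iff_infix, List.any_eq_true, key]
  simp only [List.mem_map]
  constructor
  · rintro ⟨l, ⟨l', hl', rfl⟩, hinf⟩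
    exact ⟨l', hl', (PySem.Chars.isIn_iff_infix _ _).mpr hinf⟩
  · rintro ⟨l', hl', h⟩
    rw [PySem.Chars.isIn_iff_infix] at h
    exact ⟨l'.toList, ⟨l', hl', rfl⟩, h⟩

-- invariant of B's fused loop: the three state components are A's fold, an 'any' for
-- 'Failed', and one 'any' per severe pattern
theorem altFold_inv (lines : List String) :
    ∀ (ms : Option Int) (fl s1 s2 s3 : Bool),
      lines.foldl altStep (ms, fl, [s1, s2, s3]) =
        (lines.foldl cellsStep ms,
         fl || lines.any (fun l => PySem.Str.isIn "Failed" l),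
         [s1 || lines.any (fun l => PySem.Str.isIn "Zero or negative face area" l),
          s2 || lines.any (fun l => PySem.Str.isIn "Zero or negative cell volume" l),
          s3 || lines.any (fun l => PySem.Str.isIn "incorrectly oriented" l)]) := by
  induction lines with
  | nil => intro ms fl s1 s2 s3; simp
  | cons h t ih =>
      intro ms fl s1 s2 s3
      simp only [List.foldl_cons, List.any_cons]
      rw [show altStep (ms, fl, [s1, s2, s3]) h =
            (cellsStep ms h, fl || PySem.Str.isIn "Failed" h,
             [s1 || PySem.Str.isIn "Zero or negative face area" h,
              s2 || PySem.Str.isIn "Zero or negative cell volume" h,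
              s3 || PySem.Str.isIn "incorrectly oriented" h]) from by
        simp [altStep, SEVERE_PATTERNS]]
      rw [ih]
      simp [Bool.or_assoc]

theorem noBreak_of_all (p : String) (h : p.toList.all (fun c => !pvIsB c) = true) :
    ∀ c ∈ p.toList, pvIsB c = false := by
  intro c hc
  simpa using List.all_eq_true.mp h c hc

theorem final_assembly (text : String) :
    parse_checkmesh_output text = parse_checkmesh_output_alt text := by
  have hF := isIn_eq_any_line "Failed" text (by simp) (noBreak_of_all _ (by simp [pvIsB]))
  have h1 := isIn_eq_any_line "Zero or negative face area" text (by simp) (noBreak_of_all _ (by simp [pvIsB]))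
  have h2 := isIn_eq_any_line "Zero or negative cell volume" text (by simp) (noBreak_of_all _ (by simp [pvIsB]))
  have h3 := isIn_eq_any_line "incorrectly oriented" text (by simp) (noBreak_of_all _ (by simp [pvIsB]))
  unfold parse_checkmesh_output parse_checkmesh_output_alt
  rw [show (SEVERE_PATTERNS.map (fun _ => false)) = [false, false, false] from rfl]
  rw [altFold_inv]
  simp only [SEVERE_PATTERNS, List.filter, hF, h1, h2, h3]
  cases hb1 : (PySem.Str.splitlines text).any (fun l => PySem.Str.isIn "Zero or negative face area" l) <;>
  cases hb2 : (PySem.Str.splitlines text).any (fun l => PySem.Str.isIn "Zero or negative cell volume" l) <;>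
  cases hb3 : (PySem.Str.splitlines text).any (fun l => PySem.Str.isIn "incorrectly oriented" l) <;>
  cases hbF : (PySem.Str.splitlines text).any (fun l => PySem.Str.isIn "Failed" l) <;>
    simp [List.zip, List.zipWith, List.filter]

-- ===== VERDICT (by name: the statement is the Claim_ definition above) =====
theorem parse_checkmesh_output_spec : Claim_equal_parse_checkmesh_output := by
  intro text _
  unfold Spec_parse_checkmesh_output
  exact final_assembly text
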